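-- pv_equiv track=rewrite | github.com/huggingface/ml-intern | agent/tools/github_find_examples.py | _get_pattern_priority
-- ===== SOURCE A (Python) =====
-- EXAMPLE_PATTERNS = [
--     "scripts",
--     # General example patterns (catch-all, lower priority)
--     "examples",
--     "example",
--     # Notebook patterns
--     "notebooks",
--     "notebook",
--     # Tutorial/learning patterns
--     "tutorials",
--     "tutorial",
--     "quickstart",
--     "walkthroughs",
--     "walkthrough",
--     # Cookbook/recipe patterns
--     "cookbook",
--     "cookbooks",
--     "recipes",
--     "recipe",
--     # Demo/sample patterns
--     "demos",
--     "demo",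
--     "samples",
--     "sample",
--     # Other patterns
--     "guides",
--     "guide",
--     "getting-started",
--     "getting_started",
--     "playground",
--     "howto",
--     "how-to",
--     "use-cases",
--     "usecases",
--     "use_cases",
--     "sandbox",
--     "showcase",
-- ]
--
-- def _get_pattern_priority(file_path: str) -> tuple[int, int, int]:
--     """
--     Get priority of a file path based on which example pattern directory it's in.
--
--     Returns: (in_examples_dir, pattern_priority, path_depth)
--     - in_examples_dir: 0 if in examples/ directory, 1 otherwise (lower is better)
--     - pattern_priority: Index in EXAMPLE_PATTERNS (lower is better), or 999 if no match
--     - path_depth: Number of path segments (lower is better)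
--
--     Note: Prioritizes files in "examples/" directory first, then by most specific pattern match.
--     E.g., "examples/scripts/train.py" is better than "scripts/util.py"
--     """
--     path_lower = file_path.lower()
--     path_parts = path_lower.split("/")
--
--     # Check if file is in examples/ directory (highest priority)
--     in_examples_dir = 0 if (path_parts[0] in ["examples", "example"]) else 1
--
--     # Find ALL matching patterns and use the best (lowest index) one
--     # But prefer deeper matches (more specific) over shallow ones
--     best_priority = 999
--     best_depth_at_match = -1
--
--     for i, pattern in enumerate(EXAMPLE_PATTERNS):
--         # Check if pattern appears as a directory component in the path
--         if pattern in path_parts: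
--             # Find the depth where this pattern appears (rightmost occurrence)
--             depth = len(path_parts) - 1 - path_parts[::-1].index(pattern)
--
--             # Prefer deeper matches, or better priority if at same depth
--             if depth > best_depth_at_match or (
--                 depth == best_depth_at_match and i < best_priority
--             ):
--                 best_priority = i
--                 best_depth_at_match = depth
--
--     return (in_examples_dir, best_priority, len(path_parts))
-- ===== SOURCE B (Python) =====
-- EXAMPLE_PATTERNS = [
--     "scripts",
--     # General example patterns (catch-all, lower priority)
--     "examples",
--     "example",
--     # Notebook patterns
--     "notebooks",
--     "notebook",
--     # Tutorial/learning patterns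
--     "tutorials",
--     "tutorial",
--     "quickstart",
--     "walkthroughs",
--     "walkthrough",
--     # Cookbook/recipe patterns
--     "cookbook",
--     "cookbooks",
--     "recipes",
--     "recipe",
--     # Demo/sample patterns
--     "demos",
--     "demo",
--     "samples",
--     "sample",
--     # Other patterns
--     "guides",
--     "guide",
--     "getting-started",
--     "getting_started",
--     "playground",
--     "howto",
--     "how-to",
--     "use-cases",
--     "usecases",
--     "use_cases",
--     "sandbox",
--     "showcase",
-- ]
--
-- _PATTERN_SET = frozenset(EXAMPLE_PATTERNS)
--
--
-- def _get_pattern_priority(file_path: str) -> tuple[int, int, int]: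
--     """Scan the path components from the deepest one upward; the first component
--     that is an example pattern decides the priority (its index in
--     EXAMPLE_PATTERNS), 999 if none matches."""
--     path_parts = file_path.lower().split("/")
--     in_examples_dir = 0 if path_parts[0] in ("examples", "example") else 1
--     best_priority = 999
--     for part in reversed(path_parts):
--         if part in _PATTERN_SET:
--             best_priority = EXAMPLE_PATTERNS.index(part)
--             break
--     return (in_examples_dir, best_priority, len(path_parts))
-- ===== Notes on version B (the rewrite author's own statement) =====
-- stated objective: faster
-- what changed: Instead of looping over all 30 patterns and computing a rightmost-occurrence depth per pattern, B scans the path components once from deepest to shallowest and stops at the first component in a precomputed frozenset of patterns, taking its index as the priority (999 if none); the same-depth tie-break never fires since a depth holds one component.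
import Mathlib
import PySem

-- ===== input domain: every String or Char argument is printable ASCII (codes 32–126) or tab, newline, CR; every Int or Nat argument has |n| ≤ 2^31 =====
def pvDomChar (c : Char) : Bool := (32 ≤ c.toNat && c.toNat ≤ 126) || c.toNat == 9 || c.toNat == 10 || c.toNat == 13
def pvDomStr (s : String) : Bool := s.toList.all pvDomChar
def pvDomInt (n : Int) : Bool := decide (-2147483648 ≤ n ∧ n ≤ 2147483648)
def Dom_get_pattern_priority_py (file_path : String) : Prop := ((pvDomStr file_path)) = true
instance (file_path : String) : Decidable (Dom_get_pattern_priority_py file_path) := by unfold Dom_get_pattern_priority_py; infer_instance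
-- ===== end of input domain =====

-- B replaces A's loop over all patterns (with a reversed .index scan per pattern) by one
-- deepest-first scan of the path components that stops at the first pattern hit.

-- ===== PORT A =====
def examplePatterns : List String :=
  ["scripts", "examples", "example", "notebooks", "notebook", "tutorials", "tutorial",
   "quickstart", "walkthroughs", "walkthrough", "cookbook", "cookbooks", "recipes", "recipe",
   "demos", "demo", "samples", "sample", "guides", "guide", "getting-started",
   "getting_started", "playground", "howto", "how-to", "use-cases", "usecases", "use_cases",
   "sandbox", "showcase"]

-- one iteration of A's `for i, pattern in enumerate(EXAMPLE_PATTERNS)` loop;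
-- state = (best_priority, best_depth_at_match). `.index` is guarded by the membership
-- test, so `index?` is `some` whenever the `.getD 0` default is reached.
def aStep (path_parts : List String) (st : Int × Int) (ip : Int × String) : Int × Int :=
  if ip.2 ∈ path_parts then
    let depth : Int := (path_parts.length : Int) - 1 -
      (((PySem.List.index? path_parts.reverse ip.2).getD 0 : Nat) : Int)
    if depth > st.2 ∨ (depth = st.2 ∧ ip.1 < st.1) then (ip.1, depth) else st
  else st

def get_pattern_priority_py (file_path : String) : Int × Int × Int :=
  let path_parts := (PySem.Str.split? (PySem.Str.lower file_path) "/").getD []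
  -- Python's split("/") never returns an empty list, so parts[0] cannot raise; `pyGetD _ 0 ""` is exact here
  let in_examples_dir : Int :=
    if PySem.List.pyGetD path_parts 0 "" ∈ (["examples", "example"] : List String) then 0 else 1
  let st := (PySem.List.enumerate examplePatterns).foldl (aStep path_parts) (999, -1)
  (in_examples_dir, st.1, (path_parts.length : Int))

-- ===== PORT B =====
def patternSet : PySem.Set String := PySem.Set.ofList examplePatterns

-- Source B's `for part in reversed(path_parts): if part in _PATTERN_SET: … break`;
-- `.index` is guarded by the set-membership test, so `index?` is `some` when `.getD 0` is reached.
def bScan : List String → Int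
  | [] => 999
  | part :: rest =>
    if PySem.Set.contains patternSet part then
      (((PySem.List.index? examplePatterns part).getD 0 : Nat) : Int)
    else bScan rest

def get_pattern_priority_py_alt (file_path : String) : Int × Int × Int :=
  let path_parts := (PySem.Str.split? (PySem.Str.lower file_path) "/").getD []
  let in_examples_dir : Int :=
    if PySem.List.pyGetD path_parts 0 "" ∈ (["examples", "example"] : List String) then 0 else 1
  (in_examples_dir, bScan path_parts.reverse, (path_parts.length : Int))

-- ===== PRECONDITION & SPEC =====
def Spec_get_pattern_priority_py (file_path : String) (out : Int × Int × Int) : Prop := out = get_pattern_priority_py_alt file_path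
instance (file_path : String) (out : Int × Int × Int) : Decidable (Spec_get_pattern_priority_py file_path out) := by unfold Spec_get_pattern_priority_py; infer_instance

-- ===== CLAIM (what is proved, stated in full; the proofs are below) =====
def Claim_equal_get_pattern_priority_py : Prop := ∀ (file_path : String), Dom_get_pattern_priority_py file_path → Spec_get_pattern_priority_py file_path (get_pattern_priority_py file_path)

-- ===== LEMMAS AND PROOFS =====

-- A's per-pattern "depth of the rightmost occurrence", over the reversed component list
def dep (rev : List String) (x : String) : Int :=
  (rev.length : Int) - 1 - (((PySem.List.index? rev x).getD 0 : Nat) : Int)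

-- A's step, phrased over the reversed component list only
def stepR (rev : List String) (st : Int × Int) (ip : Int × String) : Int × Int :=
  if ip.2 ∈ rev then
    if dep rev ip.2 > st.2 ∨ (dep rev ip.2 = st.2 ∧ ip.1 < st.1) then (ip.1, dep rev ip.2) else st
  else st

lemma aStep_eq_stepR (parts : List String) (st : Int × Int) (ip : Int × String) :
    aStep parts st ip = stepR parts.reverse st ip := by
  simp [aStep, stepR, dep]

lemma dep_cons_of_ne (r : String) (rest : List String) (x : String)
    (hx : x ∈ rest) (hrx : r ≠ x) : dep (r :: rest) x = dep rest x := by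
  obtain ⟨k, hk⟩ := Option.isSome_iff_exists.mp ((PySem.List.index?_isSome_iff rest x).mpr hx)
  unfold dep
  rw [PySem.List.index?_cons_of_ne rest hrx, hk]
  simp only [Option.map_some, Option.getD_some, List.length_cons]
  push_cast
  ring

lemma dep_cons_self (x : String) (rest : List String) :
    dep (x :: rest) x = (rest.length : Int) := by
  unfold dep
  rw [PySem.List.index?_cons_self]
  simp

lemma dep_lt_length (rest : List String) (x : String) :
    dep rest x < (rest.length : Int) := by
  unfold dep
  omega

-- the state of A's loop after it has processed the (nodup) pattern prefix ps
def specPair (rev ps : List String) : Int × Int :=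
  match rev.find? (fun x => decide (x ∈ ps)) with
  | none => (999, -1)
  | some x => ((((PySem.List.index? ps x).getD 0 : Nat) : Int), dep rev x)

lemma specPair_eq_none {rev ps : List String}
    (h : rev.find? (fun x => decide (x ∈ ps)) = none) : specPair rev ps = (999, -1) := by
  unfold specPair; rw [h]

lemma specPair_eq_some {rev ps : List String} {x : String}
    (h : rev.find? (fun x => decide (x ∈ ps)) = some x) :
    specPair rev ps = ((((PySem.List.index? ps x).getD 0 : Nat) : Int), dep rev x) := by
  unfold specPair; rw [h]

lemma specPair_cons_not_mem (r : String) (rest S : List String) (hr : r ∉ S) :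
    specPair (r :: rest) S = specPair rest S := by
  have hskip : (r :: rest).find? (fun x => decide (x ∈ S)) = rest.find? (fun x => decide (x ∈ S)) :=
    List.find?_cons_of_neg (by simpa using hr)
  cases hfind : rest.find? (fun x => decide (x ∈ S)) with
  | none => rw [specPair_eq_none (hskip.trans hfind), specPair_eq_none hfind]
  | some x =>
    have hxS : x ∈ S := by have := List.find?_some hfind; simpa using this
    have hxrest : x ∈ rest := List.mem_of_find?_eq_some hfind
    have hxr : r ≠ x := fun h => hr (h ▸ hxS)
    rw [specPair_eq_some (hskip.trans hfind), specPair_eq_some hfind,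
      dep_cons_of_ne r rest x hxrest hxr]

lemma stepR_cons_ne (r : String) (rest : List String) (st : Int × Int) (i : Int)
    (p : String) (hrp : r ≠ p) :
    stepR (r :: rest) st (i, p) = stepR rest st (i, p) := by
  unfold stepR
  by_cases hp : p ∈ rest
  · rw [if_pos (show p ∈ r :: rest from List.mem_cons_of_mem _ hp), if_pos hp,
      dep_cons_of_ne r rest p hp hrp]
  · rw [if_neg (by simp [hrp.symm, hp]), if_neg hp]

lemma step_spec (rev ps : List String) (p : String) (hp : p ∉ ps) :
    stepR rev (specPair rev ps) ((ps.length : Int), p) = specPair rev (ps ++ [p]) := by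
  induction rev with
  | nil => simp [stepR, specPair]
  | cons r rest ih =>
    by_cases hr : r ∈ ps
    · -- head matches ps already; p's depth is strictly shallower, so A keeps the state
      have hrp : p ≠ r := fun h => hp (h ▸ hr)
      have hr' : r ∈ ps ++ [p] := List.mem_append_left _ hr
      rw [specPair_eq_some (List.find?_cons_of_pos (by simpa using hr)),
        specPair_eq_some (List.find?_cons_of_pos (by simpa using hr')),
        PySem.List.index?_append_of_mem [p] hr, dep_cons_self r rest]
      unfold stepR
      by_cases hpr : p ∈ r :: rest
      · have hprest : p ∈ rest := by
          rcases List.mem_cons.mp hpr with h | h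
          · exact absurd h hrp
          · exact h
        rw [if_pos hpr, dep_cons_of_ne r rest p hprest (Ne.symm hrp)]
        have hlt := dep_lt_length rest p
        rw [if_neg (by rintro (h | ⟨h, -⟩) <;> omega)]
      · rw [if_neg hpr]
    · by_cases hrp : r = p
      · -- the head IS p: the deepest p, depth rest.length, beats any match strictly above it
        subst hrp
        rw [specPair_cons_not_mem r rest ps hr,
          specPair_eq_some (List.find?_cons_of_pos (show decide (r ∈ ps ++ [r]) = true by simp)),
          PySem.List.index?_append_singleton_self ps r hr, dep_cons_self r rest]
        unfold stepR
        rw [if_pos List.mem_cons_self, dep_cons_self r rest]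
        cases hfind : rest.find? (fun x => decide (x ∈ ps)) with
        | none =>
          rw [specPair_eq_none hfind, if_pos (by left; omega)]
          simp
        | some x =>
          have hxS : x ∈ ps := by have := List.find?_some hfind; simpa using this
          have hxrest : x ∈ rest := List.mem_of_find?_eq_some hfind
          rw [specPair_eq_some hfind]
          have hlt := dep_lt_length rest x
          rw [if_pos (by left; exact lt_of_lt_of_le hlt (by exact_mod_cast Nat.le_refl _))]
          simp
      · rw [specPair_cons_not_mem r rest ps hr,
          specPair_cons_not_mem r rest (ps ++ [p]) (by simp [hr, hrp]),
          stepR_cons_ne r rest _ _ p hrp]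
        exact ih

lemma fold_spec (ps : List String) (h : ps.Nodup) (rev : List String) :
    List.foldl (stepR rev) (999, -1) (PySem.List.enumerate ps) = specPair rev ps := by
  induction ps using List.reverseRecOn with
  | nil =>
    rw [PySem.List.enumerate_nil, List.foldl_nil,
      specPair_eq_none (List.find?_eq_none.mpr (by simp))]
  | append_singleton ps p ih =>
    have hnd : ps.Nodup := h.of_append_left
    have hp : p ∉ ps := by
      rw [List.nodup_append] at h
      intro hmem
      exact h.2.2 p hmem p (by simp) rfl
    rw [PySem.List.enumerate_append, PySem.List.enumerate_cons, PySem.List.enumerate_nil,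
      List.foldl_append, ih hnd]
    simpa using step_spec rev ps p hp

lemma bScan_spec (rev : List String) : bScan rev = (specPair rev examplePatterns).1 := by
  induction rev with
  | nil => simp [bScan, specPair]
  | cons r rest ih =>
    by_cases hr : r ∈ examplePatterns
    · have hm : r ∈ patternSet := by simp [patternSet, PySem.Set.mem_ofList, hr]
      rw [specPair_eq_some (List.find?_cons_of_pos (by simpa using hr))]
      simp [bScan, hm]
    · have hm : r ∉ patternSet := by simp [patternSet, PySem.Set.mem_ofList, hr]
      have hb : bScan (r :: rest) = bScan rest := by simp [bScan, hm]
      rw [hb, specPair_cons_not_mem r rest examplePatterns hr, ih]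

lemma nodup_examplePatterns : examplePatterns.Nodup := by
  simp [examplePatterns, List.nodup_cons, List.mem_cons]

-- ===== VERDICT (by name: the statement is the Claim_ definition above) =====
theorem get_pattern_priority_py_spec : Claim_equal_get_pattern_priority_py := by
  intro fp _
  unfold Spec_get_pattern_priority_py
  simp only [get_pattern_priority_py, get_pattern_priority_py_alt]
  have he : aStep ((PySem.Str.split? (PySem.Str.lower fp) "/").getD []) =
      stepR ((PySem.Str.split? (PySem.Str.lower fp) "/").getD []).reverse := by
    funext st ip; exact aStep_eq_stepR _ st ip
  rw [he, fold_spec examplePatterns nodup_examplePatterns, bScan_spec]
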